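-- pv_equiv track=rewrite | github.com/I-Hogan/arborist | classic-cli-boardgames/classic_cli_boardgames/core/validation.py | require_rectangular_grid
-- ===== SOURCE A (Python) =====
-- from typing import Sequence, TypeVar
--
-- T = TypeVar("T")
--
-- def require_rectangular_grid(grid: Sequence[Sequence[T]]) -> tuple[int, int]:
--     """Ensure the grid is rectangular and return (rows, columns)."""
--     if not grid:
--         raise ValueError("grid must not be empty")
--     columns = len(grid[0])
--     if columns == 0:
--         raise ValueError("grid must contain at least one column")
--     for row in grid:
--         if len(row) != columns:
--             raise ValueError("grid rows must be the same length")
--     return len(grid), columns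
-- ===== SOURCE B (Python) =====
-- def require_rectangular_grid(grid):
--     """Ensure the grid is rectangular and return (rows, columns)."""
--     if not grid:
--         raise ValueError("grid must not be empty")
--     columns = len(grid[0])
--     if columns == 0:
--         raise ValueError("grid must contain at least one column")
--     rows = len(grid)
--     lengths = [len(row) for row in grid]
--     # arithmetic certificate: every length <= max, so max == columns and
--     # sum == rows * columns together force every row length == columns
--     if max(lengths) != columns or sum(lengths) != rows * columns:
--         raise ValueError("grid rows must be the same length")
--     return rows, columns
-- ===== Notes on version B (the rewrite author's own statement) =====
-- stated objective: alternative
-- what changed: Replaces A's per-row equality loop with an arithmetic certificate: the grid is rectangular iff max(row lengths) == columns and sum(row lengths) == rows*columns, since each length <= max forces equality when the sum matches.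
import Mathlib
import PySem

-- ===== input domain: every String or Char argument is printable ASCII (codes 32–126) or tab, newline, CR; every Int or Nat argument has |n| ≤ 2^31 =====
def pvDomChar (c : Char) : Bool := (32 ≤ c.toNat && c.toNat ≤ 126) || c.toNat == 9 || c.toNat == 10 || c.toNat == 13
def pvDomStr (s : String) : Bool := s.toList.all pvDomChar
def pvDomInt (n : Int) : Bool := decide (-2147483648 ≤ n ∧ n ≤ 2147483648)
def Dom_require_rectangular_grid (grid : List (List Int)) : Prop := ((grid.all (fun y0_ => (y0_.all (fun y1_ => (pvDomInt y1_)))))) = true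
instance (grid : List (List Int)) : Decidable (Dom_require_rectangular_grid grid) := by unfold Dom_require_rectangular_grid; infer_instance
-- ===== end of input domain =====

-- B replaces A's per-row equality loop with an arithmetic certificate (max of row lengths == columns
-- and sum of row lengths == rows*columns); alternative decomposition, same cost.
-- Both programs raise ValueError on the same inputs (empty grid, empty first row, ragged grid); Pre_ excludes exactly those.

-- ===== PORT A =====
-- A's 'for row in grid: if len(row) != columns: raise' loop; false = the raise branch was taken
def pvCheckRowsA (columns : Int) : List (List Int) → Bool
  | [] => true
  | row :: rest => if (row.length : Int) ≠ columns then false else pvCheckRowsA columns rest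

def require_rectangular_grid (grid : List (List Int)) : Int × Int :=
  match grid with
  | [] => (0, 0)          -- raise ValueError("grid must not be empty"); outside Pre_
  | r0 :: _ =>
    if (r0.length : Int) = 0 then (0, 0)   -- raise ValueError("grid must contain at least one column"); outside Pre_
    else if pvCheckRowsA (r0.length : Int) grid then ((grid.length : Int), (r0.length : Int))
    else (0, 0)                      -- raise ValueError("grid rows must be the same length"); outside Pre_

-- ===== PORT B =====
def require_rectangular_grid_alt (grid : List (List Int)) : Int × Int :=
  match grid with
  | [] => (0, 0)          -- raise; outside Pre_
  | r0 :: _ =>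
    if (r0.length : Int) = 0 then (0, 0)   -- raise; outside Pre_
    else
      let rows : Int := (grid.length : Int)
      let lengths : List Int := grid.map (fun row => (row.length : Int))
      -- Python max(lengths): grid is nonempty here, so max? is some; sum(lengths) is a left fold from 0
      if PySem.List.max? lengths (fun x => x) ≠ some (r0.length : Int)
         ∨ lengths.foldl (· + ·) 0 ≠ rows * (r0.length : Int)
      then (0, 0)    -- raise; outside Pre_
      else (rows, (r0.length : Int))

-- ===== PRECONDITION & SPEC =====
-- Pre_ excludes exactly the inputs where A raises ValueError (empty grid, empty first row, ragged rows).
def Pre_require_rectangular_grid (grid : List (List Int)) : Prop :=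
  grid ≠ [] ∧ grid.headI.length ≠ 0 ∧ ∀ row ∈ grid, row.length = grid.headI.length
instance (grid : List (List Int)) : Decidable (Pre_require_rectangular_grid grid) := by
  unfold Pre_require_rectangular_grid; infer_instance

def pvWitness_require_rectangular_grid : List (List Int) := [[1, 2], [3, 4]]

def Spec_require_rectangular_grid (grid : List (List Int)) (out : Int × Int) : Prop := out = require_rectangular_grid_alt grid
instance (grid : List (List Int)) (out : Int × Int) : Decidable (Spec_require_rectangular_grid grid out) := by unfold Spec_require_rectangular_grid; infer_instance

-- ===== CLAIM (what is proved, stated in full; the proofs are below) =====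
def Claim_equal_require_rectangular_grid : Prop := ∀ (grid : List (List Int)), Dom_require_rectangular_grid grid → Pre_require_rectangular_grid grid → Spec_require_rectangular_grid grid (require_rectangular_grid grid)

-- ===== LEMMAS AND PROOFS =====
theorem pvCheckRowsA_of_all {columns : Int} {l : List (List Int)}
    (h : ∀ row ∈ l, (row.length : Int) = columns) : pvCheckRowsA columns l = true := by
  induction l with
  | nil => rfl
  | cons row rest ih =>
    simp only [pvCheckRowsA]
    rw [if_neg (by simpa using h row (by simp))]
    exact ih fun r hr => h r (by simp [hr])

theorem pvFoldlMax_const {c : Int} {l : List Int} (h : ∀ x ∈ l, x = c) :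
    l.foldl max c = c := by
  induction l with
  | nil => rfl
  | cons x rest ih =>
    have hx : x = c := h x (by simp)
    simp only [List.foldl_cons, hx, max_self]
    exact ih fun y hy => h y (by simp [hy])

theorem pvFoldlSum_const {c a : Int} {l : List Int} (h : ∀ x ∈ l, x = c) :
    l.foldl (· + ·) a = a + (l.length : Int) * c := by
  induction l generalizing a with
  | nil => simp
  | cons x rest ih =>
    have hx : x = c := h x (by simp)
    rw [List.foldl_cons, hx, ih fun y hy => h y (by simp [hy])]
    simp only [List.length_cons]
    push_cast
    ring

-- ===== VERDICT (by name: the statement is the Claim_ definition above) =====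
theorem require_rectangular_grid_spec : Claim_equal_require_rectangular_grid := by
  intro grid _ hpre
  obtain ⟨hne, hcols, hall⟩ := hpre
  unfold Spec_require_rectangular_grid
  cases grid with
  | nil => exact absurd rfl hne
  | cons r0 rest =>
    simp only [List.headI] at hcols hall
    simp only [require_rectangular_grid, require_rectangular_grid_alt]
    have hc : ((r0.length : Int)) ≠ 0 := by exact_mod_cast fun h => hcols (by exact_mod_cast h)
    rw [if_neg hc, if_neg hc]
    have hchk : pvCheckRowsA (r0.length : Int) (r0 :: rest) = true :=
      pvCheckRowsA_of_all (fun row hr => by exact_mod_cast hall row hr)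
    rw [if_pos hchk]
    have hconst : ∀ x ∈ ((r0 :: rest).map (fun row => (row.length : Int))), x = (r0.length : Int) := by
      intro x hx
      simp only [List.mem_map] at hx
      obtain ⟨row, hr, hxv⟩ := hx
      rw [← hxv]
      exact_mod_cast hall row hr
    have hmax : PySem.List.max? ((r0.length : Int) :: rest.map (fun row => (row.length : Int)))
        (fun x => x) = some (r0.length : Int) := by
      rw [PySem.List.max?_id_cons]
      exact congrArg some (pvFoldlMax_const (fun y hy => hconst y (by simp [hy])))
    have hsum : (rest.map (fun row => (row.length : Int))).foldl (· + ·) (r0.length : Int)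
        = ((rest.length : Int) + 1) * (r0.length : Int) := by
      rw [pvFoldlSum_const (fun y hy => hconst y (by simp [hy]))]
      simp only [List.length_map]
      ring
    rw [if_neg (by
      simp only [List.map_cons, List.length_cons, List.foldl_cons]
      rw [hmax, zero_add, hsum]
      simp)]
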